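-- pv_equiv track=rewrite | github.com/cbain00/PHYS220_Blackjack | Current Statistical Version of Code.py | eval_ace
-- ===== SOURCE A (Python) =====
-- def eval_ace(hand):
--
--     # aces are initially assigned as 11, so this checks if you have any aces in your hand
--     if 11 in hand:
--         # this loop iterates through all cards in the hand to check if each card is an ace
--         for i in range(len(hand)):
--             total = sum(hand)
--             if 11 in hand and total > 21:
--                 # at the first position where there is an ace (11), change the ace value to 1
--                 position_ace = hand.index(11)
--                 hand[position_ace] = 1
--     return hand
-- ===== SOURCE B (Python) =====
-- def eval_ace(hand):
--     total = sum(hand)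
--     out = []
--     for x in hand:
--         if x == 11 and total > 21:
--             out.append(1)
--             total -= 10
--         else:
--             out.append(x)
--     return out
-- ===== Notes on version B (the rewrite author's own statement) =====
-- stated objective: alternative
-- what changed: Instead of A's nested passes (a loop that recomputes sum(hand) and re-scans for the first ace each iteration, mutating the list), B makes a single left-to-right pass with a running total computed once, emitting 1 for each ace while the total exceeds 21; B does not mutate its argument.
import Mathlib
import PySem

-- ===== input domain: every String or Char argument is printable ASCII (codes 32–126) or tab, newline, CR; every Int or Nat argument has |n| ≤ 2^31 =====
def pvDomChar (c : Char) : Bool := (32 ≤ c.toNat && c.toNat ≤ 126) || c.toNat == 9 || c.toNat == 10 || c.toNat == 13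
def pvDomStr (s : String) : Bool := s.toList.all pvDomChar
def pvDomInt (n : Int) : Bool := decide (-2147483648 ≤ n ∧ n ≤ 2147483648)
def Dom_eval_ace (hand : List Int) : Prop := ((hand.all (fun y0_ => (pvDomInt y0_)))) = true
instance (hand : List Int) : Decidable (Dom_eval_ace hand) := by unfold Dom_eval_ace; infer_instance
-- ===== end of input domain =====

-- B converts aces in a single left-to-right pass with a running total computed once, instead of
-- A's loop that recomputes the sum and re-scans for the first ace each iteration; A mutates its
-- argument in place, B does not — the equivalence proved here is about the return value only.

-- ===== PORT A =====
-- loop body of A's `for i in range(len(hand))` loop (state: the hand list)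
def pvAStep (h : List Int) : List Int :=
  let total := h.sum
  if (11 : Int) ∈ h ∧ total > 21 then
    match PySem.List.index? h (11 : Int) with
    | some i => h.set i (1 : Int)
    | none => h   -- unreachable: guarded by 11 ∈ h (Python would raise ValueError)
  else h

def eval_ace (hand : List Int) : List Int :=
  if (11 : Int) ∈ hand then
    (List.range hand.length).foldl (fun h _ => pvAStep h) hand
  else hand

-- ===== PORT B =====
def eval_ace_alt (hand : List Int) : List Int :=
  (hand.foldl
    (fun (st : List Int × Int) x =>
      if x = 11 ∧ st.2 > 21 then (st.1 ++ [1], st.2 - 10) else (st.1 ++ [x], st.2))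
    ([], hand.sum)).1

-- ===== PRECONDITION & SPEC =====
def Spec_eval_ace (hand : List Int) (out : List Int) : Prop := out = eval_ace_alt hand
instance (hand : List Int) (out : List Int) : Decidable (Spec_eval_ace hand out) := by unfold Spec_eval_ace; infer_instance

-- ===== CLAIM (what is proved, stated in full; the proofs are below) =====
def Claim_equal_eval_ace : Prop := ∀ (hand : List Int), Dom_eval_ace hand → Spec_eval_ace hand (eval_ace hand)

-- ===== LEMMAS AND PROOFS =====

-- proof-side spec of B's single pass: running total t, convert each ace while t > 21
def pvGo : List Int → Int → List Int
  | [], _ => []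
  | x :: xs, t => if x = 11 ∧ t > 21 then 1 :: pvGo xs (t - 10) else x :: pvGo xs t

-- replace the first 11 by 1 (what `hand[hand.index(11)] = 1` does)
def pvRepl : List Int → List Int
  | [] => []
  | x :: xs => if x = 11 then 1 :: xs else x :: pvRepl xs

theorem pvB_bridge (l : List Int) (acc : List Int) (t : Int) :
    (l.foldl
      (fun (st : List Int × Int) x =>
        if x = 11 ∧ st.2 > 21 then (st.1 ++ [1], st.2 - 10) else (st.1 ++ [x], st.2))
      (acc, t)).1 = acc ++ pvGo l t := by
  induction l generalizing acc t with
  | nil => simp [pvGo]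
  | cons x xs ih =>
    by_cases h : x = 11 ∧ t > 21 <;> simp [pvGo, h, ih, List.append_assoc]

theorem pvIndexSet_eq_repl (h : List Int) (hm : (11 : Int) ∈ h) :
    (match PySem.List.index? h (11 : Int) with
     | some i => h.set i (1 : Int)
     | none => h) = pvRepl h := by
  induction h with
  | nil => cases hm
  | cons x xs ih =>
    by_cases hx : x = (11 : Int)
    · subst hx
      rw [PySem.List.index?_cons_self]
      simp [pvRepl]
    · have hm' : (11 : Int) ∈ xs := by
        cases hm with
        | head => exact absurd rfl hx
        | tail _ h' => exact h'
      rw [PySem.List.index?_cons_of_ne xs hx]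
      rcases hh : PySem.List.index? xs (11 : Int) with _ | i
      · exact absurd hm' (Iff.mp (PySem.List.index?_eq_none_iff xs 11) hh)
      · have ihs := ih hm'
        rw [hh] at ihs
        simp only [Option.map_some]
        show (x :: xs).set (i + 1) 1 = pvRepl (x :: xs)
        simp only [pvRepl, if_neg hx, List.set_cons_succ]
        exact congrArg (List.cons x) ihs

theorem pvAStep_cond (h : List Int) (hm : (11 : Int) ∈ h) (hs : h.sum > 21) :
    pvAStep h = pvRepl h := by
  unfold pvAStep
  rw [if_pos ⟨hm, hs⟩]
  exact pvIndexSet_eq_repl h hm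

theorem pvAStep_done (h : List Int) (hd : ¬ ((11 : Int) ∈ h ∧ h.sum > 21)) :
    pvAStep h = h := by
  unfold pvAStep
  rw [if_neg hd]

theorem pvRepl_sum (h : List Int) (hm : (11 : Int) ∈ h) :
    (pvRepl h).sum = h.sum - 10 := by
  induction h with
  | nil => cases hm
  | cons x xs ih =>
    by_cases hx : x = (11 : Int)
    · subst hx; simp [pvRepl]; ring
    · have hm' : (11 : Int) ∈ xs := by
        cases hm with
        | head => exact absurd rfl hx
        | tail _ h' => exact h'
      simp [pvRepl, hx, ih hm']
      ring

theorem pvRepl_count (h : List Int) (hm : (11 : Int) ∈ h) :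
    (pvRepl h).count 11 = h.count 11 - 1 := by
  induction h with
  | nil => cases hm
  | cons x xs ih =>
    by_cases hx : x = (11 : Int)
    · subst hx
      simp [pvRepl]
    · have hm' : (11 : Int) ∈ xs := by
        cases hm with
        | head => exact absurd rfl hx
        | tail _ h' => exact h'
      have hpos : 0 < xs.count 11 := List.count_pos_iff.mpr hm'
      simp [pvRepl, hx, ih hm']

theorem pvGo_no_ace (h : List Int) (t : Int) (hm : (11 : Int) ∉ h) : pvGo h t = h := by
  induction h generalizing t with
  | nil => rfl
  | cons x xs ih =>
    have hx : x ≠ (11 : Int) := fun e => hm (e ▸ List.mem_cons_self)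
    simp only [pvGo]
    rw [if_neg (fun hc => hx hc.1)]
    rw [ih t (fun h' => hm (List.mem_cons_of_mem _ h'))]

theorem pvGo_small (h : List Int) (t : Int) (ht : ¬ t > 21) : pvGo h t = h := by
  induction h with
  | nil => rfl
  | cons x xs ih =>
    simp only [pvGo]
    rw [if_neg (fun hc => ht hc.2), ih]

theorem pvGo_repl (l : List Int) (t : Int) (hm : (11 : Int) ∈ l) (ht : t > 21) :
    pvGo (pvRepl l) (t - 10) = pvGo l t := by
  induction l generalizing t with
  | nil => cases hm
  | cons x xs ih =>
    by_cases hx : x = (11 : Int)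
    · subst hx
      have h1 : pvRepl (11 :: xs) = 1 :: xs := by simp [pvRepl]
      have h2 : pvGo ((11 : Int) :: xs) t = 1 :: pvGo xs (t - 10) := by
        simp [pvGo, ht]
      have h3 : pvGo ((1 : Int) :: xs) (t - 10) = 1 :: pvGo xs (t - 10) := by
        simp only [pvGo]
        rw [if_neg (fun hc => absurd hc.1 (by norm_num))]
      rw [h1, h2, h3]
    · have hm' : (11 : Int) ∈ xs := by
        cases hm with
        | head => exact absurd rfl hx
        | tail _ h' => exact h'
      simp only [pvRepl, if_neg hx, pvGo]
      rw [if_neg (fun hc => hx hc.1), if_neg (fun hc => hx hc.1), ih t hm' ht]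

theorem pvIter_eq_go (n : Nat) (h : List Int) (hc : h.count 11 ≤ n) :
    pvAStep^[n] h = pvGo h h.sum := by
  induction n generalizing h with
  | zero =>
    have : (11 : Int) ∉ h := by
      intro hm
      exact absurd (List.count_pos_iff.mpr hm) (by omega)
    simpa using (pvGo_no_ace h h.sum this).symm
  | succ n ih =>
    by_cases hd : (11 : Int) ∈ h ∧ h.sum > 21
    · rw [Function.iterate_succ_apply, pvAStep_cond h hd.1 hd.2]
      have hc' : (pvRepl h).count 11 ≤ n := by
        rw [pvRepl_count h hd.1]
        omega
      rw [ih (pvRepl h) hc', pvRepl_sum h hd.1, pvGo_repl h h.sum hd.1 hd.2]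
    · rw [Function.iterate_succ_apply, pvAStep_done h hd]
      by_cases hm : (11 : Int) ∈ h
      · have hs : ¬ h.sum > 21 := fun hs => hd ⟨hm, hs⟩
        have hfix : ∀ k, pvAStep^[k] h = h := by
          intro k
          induction k with
          | zero => rfl
          | succ k ihk => rw [Function.iterate_succ_apply, pvAStep_done h hd, ihk]
        rw [hfix n, (pvGo_small h h.sum hs)]
      · have hc' : h.count 11 ≤ n := by
          have : h.count 11 = 0 := by
            by_contra hne
            exact hm (List.count_pos_iff.mp (by omega))
          omega
        exact ih h hc'

theorem pvFoldl_range (n : Nat) (init : List Int) :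
    (List.range n).foldl (fun h _ => pvAStep h) init = pvAStep^[n] init := by
  induction n with
  | zero => rfl
  | succ n ih =>
    rw [List.range_succ, List.foldl_append, ih, List.foldl_cons, List.foldl_nil,
      Function.iterate_succ_apply']

-- ===== VERDICT (by name: the statement is the Claim_ definition above) =====
theorem eval_ace_spec : Claim_equal_eval_ace := by
  intro hand _
  unfold Spec_eval_ace
  have hb : eval_ace_alt hand = pvGo hand hand.sum := by
    unfold eval_ace_alt
    simpa using pvB_bridge hand [] hand.sum
  unfold eval_ace
  by_cases hm : (11 : Int) ∈ hand
  · rw [if_pos hm, pvFoldl_range, pvIter_eq_go hand.length hand (List.count_le_length), hb]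
  · rw [if_neg hm, hb, pvGo_no_ace hand hand.sum hm]
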